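-- pv_equiv track=rewrite | github.com/AlifSrSE/ProblemSolves | 1985F-finalBoss.py | solve
-- ===== SOURCE A (Python) =====
-- def solve(h, a, c):
--     result = -1
--     lower = 1
--     upper = min(
--         [1 + (max(0, h - a[i]) + a[i] - 1) // a[i] * c[i] for i in range(len(a))]
--     )
--
--     while lower <= upper:
--         middle = (lower + upper) // 2
--         if check(h, a, c, middle):
--             result = middle
--             upper = middle - 1
--         else:
--             lower = middle + 1
--
--     return result
--
-- def check(h, a, c, turn):
--     total_damage = sum(a[i] + (turn - 1) // c[i] * a[i] for i in range(len(a)))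
--     return total_damage >= h
-- ===== SOURCE B (Python) =====
-- def solve(h, a, c):
--     # Group attacks by cooldown once, so each probe of the turn bisection sums
--     # over distinct cooldowns instead of rescanning every attack.
--     pairs = list(zip(a, c))
--     groups = {}
--     for ai, ci in pairs:
--         groups[ci] = groups.get(ci, 0) + ai
--     base = sum(groups.values())
--
--     def reaches(t):
--         return base + sum(g * ((t - 1) // ci) for ci, g in groups.items()) >= h
--
--     def search(lo, hi, best):
--         if lo > hi:
--             return best
--         mid = (lo + hi) // 2
--         if reaches(mid):
--             return search(lo, mid - 1, mid)
--         return search(mid + 1, hi, best)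
--
--     return search(1, min(1 + ((max(ai, h) - 1) // ai) * ci for ai, ci in pairs), -1)
-- ===== Notes on version B (the rewrite author's own statement) =====
-- stated objective: alternative
-- what changed: B builds a cooldown->total-damage counter once so each bisection probe sums over the distinct cooldowns instead of rescanning every attack, replaces the ceiling expression max(0,h-a[i])+a[i]-1 by the equal max(a[i],h)-1, iterates over zipped (damage,cooldown) pairs instead of indices, and expresses the search recursively instead of with a while loop.
import Mathlib
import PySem

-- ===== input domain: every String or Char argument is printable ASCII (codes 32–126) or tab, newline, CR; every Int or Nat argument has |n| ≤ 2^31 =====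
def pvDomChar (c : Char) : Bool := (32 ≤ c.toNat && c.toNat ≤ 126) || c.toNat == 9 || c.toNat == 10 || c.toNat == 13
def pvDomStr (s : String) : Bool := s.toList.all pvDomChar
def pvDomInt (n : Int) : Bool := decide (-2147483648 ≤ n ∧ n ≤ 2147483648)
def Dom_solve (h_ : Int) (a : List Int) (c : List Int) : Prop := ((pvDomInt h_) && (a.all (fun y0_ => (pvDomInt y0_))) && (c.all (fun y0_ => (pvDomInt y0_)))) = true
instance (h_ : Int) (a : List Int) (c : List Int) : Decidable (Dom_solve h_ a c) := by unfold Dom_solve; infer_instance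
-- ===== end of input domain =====

-- B keeps A's bisection over the turn number but builds a cooldown→total-damage counter once,
-- so each probe sums over the distinct cooldowns instead of rescanning every attack; it also
-- simplifies the ceiling bound to the equal max(a,h)-1 form and expresses the search recursively.

-- ===== PORT A =====
-- port of A's helper `check`
def solveCheck (h_ : Int) (a : List Int) (c : List Int) (turn : Int) : Bool :=
  decide (h_ ≤ ((PySem.List.pyRange 0 (PySem.List.len a) 1).map (fun i =>
      PySem.List.pyGetD a i 0 +
        PySem.Int.floordiv (turn - 1) (PySem.List.pyGetD c i 0) * PySem.List.pyGetD a i 0)).sum)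

-- A's `while lower <= upper` bisection loop
def bsLoop (h_ : Int) (a : List Int) (c : List Int) (lower upper result : Int) : Int :=
  if hlu : lower ≤ upper then
    let middle := PySem.Int.floordiv (lower + upper) 2
    if solveCheck h_ a c middle then bsLoop h_ a c lower (middle - 1) middle
    else bsLoop h_ a c (middle + 1) upper result
  else result
termination_by (upper + 1 - lower).toNat
decreasing_by
  · have := PySem.Int.floordiv_two_mid_bounds hlu; omega
  · have := PySem.Int.floordiv_two_mid_bounds hlu; omega

def solve (h_ : Int) (a : List Int) (c : List Int) : Int :=
  -- min([]) raises ValueError in Python; Pre_solve excludes a = [], so the `.getD 0` default is never used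
  let upper := (PySem.List.min? ((PySem.List.pyRange 0 (PySem.List.len a) 1).map (fun i =>
      1 + PySem.Int.floordiv
            (max 0 (h_ - PySem.List.pyGetD a i 0) + PySem.List.pyGetD a i 0 - 1)
            (PySem.List.pyGetD a i 0) * PySem.List.pyGetD c i 0)) (fun x => x)).getD 0
  bsLoop h_ a c 1 upper (-1)

-- ===== PORT B =====
-- B's grouping loop: groups[ci] = groups.get(ci, 0) + ai
def altGroups (pairs : List (Int × Int)) : PySem.Dict Int Int :=
  pairs.foldl (fun d p => PySem.Dict.insert d p.2 (PySem.Dict.getD d p.2 0 + p.1)) PySem.Dict.empty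

-- B's `reaches(t)` predicate over the cooldown groups
def altReaches (h_ base : Int) (groups : PySem.Dict Int Int) (t : Int) : Bool :=
  decide (h_ ≤ base +
    ((PySem.Dict.items groups).map (fun p => p.2 * PySem.Int.floordiv (t - 1) p.1)).sum)

-- B's recursive `search(lo, hi, best)`
def altSearch (h_ base : Int) (groups : PySem.Dict Int Int) (lo hi best : Int) : Int :=
  if hlohi : lo ≤ hi then
    let mid := PySem.Int.floordiv (lo + hi) 2
    if altReaches h_ base groups mid then altSearch h_ base groups lo (mid - 1) mid
    else altSearch h_ base groups (mid + 1) hi best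
  else best
termination_by (hi + 1 - lo).toNat
decreasing_by
  · have := PySem.Int.floordiv_two_mid_bounds hlohi; omega
  · have := PySem.Int.floordiv_two_mid_bounds hlohi; omega

def solve_alt (h_ : Int) (a : List Int) (c : List Int) : Int :=
  let pairs := a.zip c
  let groups := altGroups pairs
  let base := (PySem.Dict.values groups).sum
  -- min over an empty generator raises ValueError in Python; Pre_solve excludes a = []
  altSearch h_ base groups 1
    ((PySem.List.min? (pairs.map (fun p =>
        1 + PySem.Int.floordiv (max p.1 h_ - 1) p.1 * p.2)) (fun x => x)).getD 0) (-1)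

-- ===== PRECONDITION & SPEC =====
-- Pre_ holds exactly when A returns normally.  A raises on: a = [] (ValueError from min([])),
-- a cooldown list shorter than the damage list (IndexError), a zero damage (ZeroDivisionError in
-- the upper bound), and a zero cooldown (ZeroDivisionError in `check`) — but the last only when
-- the search interval [1, upper] is nonempty, so zero cooldowns are admitted when the interval's
-- top (the same arithmetic expression both programs use for it) is below 1 and `check` never runs.
def Pre_solve (h_ : Int) (a : List Int) (c : List Int) : Prop :=
  a ≠ [] ∧ a.length ≤ c.length ∧ (∀ x ∈ a, x ≠ 0) ∧
    ((∀ x ∈ c.take a.length, x ≠ 0) ∨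
      (PySem.List.min? ((a.zip c).map (fun p =>
          1 + PySem.Int.floordiv (max p.1 h_ - 1) p.1 * p.2)) (fun x => x)).getD 0 < 1)
instance (h_ : Int) (a : List Int) (c : List Int) : Decidable (Pre_solve h_ a c) := by
  unfold Pre_solve; infer_instance

def pvWitness_solve : Int × List Int × List Int := (10, [3, 2], [2, 3])

def Spec_solve (h_ : Int) (a : List Int) (c : List Int) (out : Int) : Prop := out = solve_alt h_ a c
instance (h_ : Int) (a : List Int) (c : List Int) (out : Int) : Decidable (Spec_solve h_ a c out) := by
  unfold Spec_solve; infer_instance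

-- ===== CLAIM (what is proved, stated in full; the proofs are below) =====
def Claim_equal_solve : Prop := ∀ (h_ : Int) (a : List Int) (c : List Int),
  Dom_solve h_ a c → Pre_solve h_ a c → Spec_solve h_ a c (solve h_ a c)

-- ===== LEMMAS AND PROOFS =====

lemma listsum_eq_finset (f : ℕ → Int) (n : ℕ) :
    ((List.range n).map f).sum = ∑ k ∈ Finset.range n, f k := by
  induction n with
  | zero => simp
  | succ n ih => simp [List.range_succ, Finset.sum_range_succ, ih]

lemma zip_eq_map_range (a c : List Int) (hlen : a.length ≤ c.length) :
    a.zip c = (List.range a.length).map (fun k => (a.getD k 0, c.getD k 0)) := by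
  apply List.ext_getElem
  · simp [List.length_zip]; omega
  · intro i h1 h2
    have hia : i < a.length := by simp [List.length_zip] at h1; omega
    have hic : i < c.length := by omega
    simp only [List.getElem_zip, List.getElem_map, List.getElem_range]
    rw [List.getD_eq_getElem a 0 hia, List.getD_eq_getElem c 0 hic]

-- `d.getD k 0` through `d.get? k`
lemma dict_getD_eq_get? (d : PySem.Dict Int Int) (k : Int) :
    PySem.Dict.getD d k 0 = (PySem.Dict.get? d k).getD 0 := by
  cases d with
  | mk its =>
    induction its with
    | nil => rfl
    | cons hd tl ih => simp [PySem.Dict.getD, PySem.Dict.get?] at ih ⊢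

-- replacing the (unique) entry with key k by (k, w) shifts the weighted item sum by (w - v)*q k
lemma replace_sum (q : Int → Int) (k w : Int) :
    ∀ (its : List (Int × Int)), (its.map (fun p => p.1)).Nodup → ∀ v : Int, (k, v) ∈ its →
    ((its.map (fun p => if p.1 == k then (k, w) else p)).map (fun p => p.2 * q p.1)).sum
      = (its.map (fun p => p.2 * q p.1)).sum - v * q k + w * q k := by
  intro its
  induction its with
  | nil => intro _ v hv; simp at hv
  | cons hd tl ih =>
    intro hnd v hv
    rw [List.map_cons, List.nodup_cons] at hnd
    obtain ⟨hnd1, hnd2⟩ := hnd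
    rcases List.mem_cons.mp hv with hv1 | hv2
    · have hhd1 : hd.1 = k := by rw [← hv1]
      have hhd2 : hd.2 = v := by rw [← hv1]
      have htl : (tl.map (fun p => if p.1 == k then (k, w) else p)) = tl := by
        conv_rhs => rw [← List.map_id tl]
        apply List.map_congr_left
        intro p hp
        have hpk : p.1 ≠ k := by
          intro hpk
          exact hnd1 (by rw [hhd1, ← hpk]; exact List.mem_map.mpr ⟨p, hp, rfl⟩)
        simp [hpk]
      simp only [List.map_cons, List.sum_cons, htl]
      rw [if_pos (by simp [hhd1] : (hd.1 == k) = true)]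
      simp only []
      rw [hhd1, hhd2]
      ring
    · have hkm : k ∈ tl.map (fun p => p.1) := List.mem_map.mpr ⟨(k, v), hv2, rfl⟩
      have hne : hd.1 ≠ k := fun he => hnd1 (he ▸ hkm)
      simp only [List.map_cons, List.sum_cons]
      rw [if_neg (by simp [hne])]
      rw [ih hnd2 v hv2]
      ring

-- one grouping step: inserting k ↦ getD k 0 + x shifts the weighted item sum by x*q k
lemma sumq_insert (q : Int → Int) (d : PySem.Dict Int Int) (k x : Int)
    (hnd : (PySem.Dict.keys d).Nodup) :
    ((PySem.Dict.items (PySem.Dict.insert d k (PySem.Dict.getD d k 0 + x))).map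
        (fun p => p.2 * q p.1)).sum
      = ((PySem.Dict.items d).map (fun p => p.2 * q p.1)).sum + x * q k := by
  rw [PySem.Dict.items_insert]
  by_cases hct : PySem.Dict.contains d k = true
  · rw [if_pos hct]
    have hsome : (PySem.Dict.get? d k).isSome := by
      rw [← PySem.Dict.contains_eq_isSome_get?]; exact hct
    obtain ⟨v, hv⟩ := Option.isSome_iff_exists.mp hsome
    have hmem := PySem.Dict.mem_items_of_get?_eq_some d hv
    have hgd : PySem.Dict.getD d k 0 = v := PySem.Dict.getD_of_mem_items d hmem hnd 0
    rw [replace_sum q k (PySem.Dict.getD d k 0 + x) (PySem.Dict.items d) hnd v hmem, hgd]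
    ring
  · rw [if_neg hct]
    have hnone : PySem.Dict.get? d k = none := by
      cases hget : PySem.Dict.get? d k with
      | none => rfl
      | some v =>
        exfalso
        exact hct (by rw [PySem.Dict.contains_eq_isSome_get?, hget]; rfl)
    have hgd : PySem.Dict.getD d k 0 = 0 := by rw [dict_getD_eq_get?, hnone]; rfl
    rw [List.map_append, List.sum_append, hgd]
    simp

-- the whole grouping fold: the weighted item sum equals the pair-list sum
lemma sumq_fold (q : Int → Int) :
    ∀ (ps : List (Int × Int)) (d : PySem.Dict Int Int), (PySem.Dict.keys d).Nodup →
    ((PySem.Dict.items (ps.foldl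
        (fun d p => PySem.Dict.insert d p.2 (PySem.Dict.getD d p.2 0 + p.1)) d)).map
          (fun p => p.2 * q p.1)).sum
      = ((PySem.Dict.items d).map (fun p => p.2 * q p.1)).sum
        + (ps.map (fun p => p.1 * q p.2)).sum := by
  intro ps
  induction ps with
  | nil => intro d _; simp
  | cons p ps ih =>
    intro d hnd
    rw [List.foldl_cons, ih _ (PySem.Dict.nodup_keys_insert d p.2 _ hnd),
      sumq_insert q d p.2 p.1 hnd]
    simp only [List.map_cons, List.sum_cons]
    ring

lemma groups_sum (q : Int → Int) (ps : List (Int × Int)) :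
    ((PySem.Dict.items (altGroups ps)).map (fun p => p.2 * q p.1)).sum
      = (ps.map (fun p => p.1 * q p.2)).sum := by
  unfold altGroups
  rw [sumq_fold q ps PySem.Dict.empty
    (by rw [show PySem.Dict.keys (PySem.Dict.empty : PySem.Dict Int Int) = [] from rfl]
        exact List.nodup_nil)]
  rw [show PySem.Dict.items (PySem.Dict.empty : PySem.Dict Int Int) = [] from rfl]
  simp

lemma groups_base (ps : List (Int × Int)) :
    (PySem.Dict.values (altGroups ps)).sum = (ps.map (fun p => p.1)).sum := by
  have h1 : (PySem.Dict.values (altGroups ps)).sum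
      = ((PySem.Dict.items (altGroups ps)).map (fun p => p.2 * (fun _ : Int => (1:Int)) p.1)).sum := by
    rw [show PySem.Dict.values (altGroups ps)
        = (PySem.Dict.items (altGroups ps)).map (fun p => p.2) from rfl]
    simp
  rw [h1, groups_sum (fun _ : Int => (1:Int)) ps]
  simp

lemma check_eq_reaches (h_ : Int) (a c : List Int) (hlen : a.length ≤ c.length) (t : Int) :
    solveCheck h_ a c t
      = altReaches h_ ((PySem.Dict.values (altGroups (a.zip c))).sum) (altGroups (a.zip c)) t := by
  unfold solveCheck altReaches
  have hA : ((PySem.List.pyRange 0 (PySem.List.len a) 1).map (fun i =>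
      PySem.List.pyGetD a i 0 +
        PySem.Int.floordiv (t - 1) (PySem.List.pyGetD c i 0) * PySem.List.pyGetD a i 0)).sum
      = ∑ k ∈ Finset.range a.length,
        (a.getD k 0 + PySem.Int.floordiv (t - 1) (c.getD k 0) * a.getD k 0) := by
    simp [PySem.List.pyRange_zero_natCast, List.map_map, Function.comp, listsum_eq_finset]
  have hS : ((PySem.Dict.items (altGroups (a.zip c))).map
        (fun p => p.2 * PySem.Int.floordiv (t - 1) p.1)).sum
      = ∑ k ∈ Finset.range a.length,
        a.getD k 0 * PySem.Int.floordiv (t - 1) (c.getD k 0) := by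
    rw [groups_sum (fun ci => PySem.Int.floordiv (t - 1) ci) (a.zip c),
      zip_eq_map_range a c hlen, List.map_map, listsum_eq_finset]
    simp [Function.comp]
  have hB : (PySem.Dict.values (altGroups (a.zip c))).sum
      = ∑ k ∈ Finset.range a.length, a.getD k 0 := by
    rw [groups_base (a.zip c), zip_eq_map_range a c hlen, List.map_map, listsum_eq_finset]
    simp [Function.comp]
  rw [hA, hS, hB, ← Finset.sum_add_distrib]
  have hsum : (∑ k ∈ Finset.range a.length,
        (a.getD k 0 + PySem.Int.floordiv (t - 1) (c.getD k 0) * a.getD k 0))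
      = ∑ k ∈ Finset.range a.length,
        (a.getD k 0 + a.getD k 0 * PySem.Int.floordiv (t - 1) (c.getD k 0)) :=
    Finset.sum_congr rfl (fun k _ => by ring)
  rw [hsum]

lemma upper_lists_eq (h_ : Int) (a c : List Int) (hlen : a.length ≤ c.length) :
    ((PySem.List.pyRange 0 (PySem.List.len a) 1).map (fun i =>
      1 + PySem.Int.floordiv
            (max 0 (h_ - PySem.List.pyGetD a i 0) + PySem.List.pyGetD a i 0 - 1)
            (PySem.List.pyGetD a i 0) * PySem.List.pyGetD c i 0))
    = ((a.zip c).map (fun p => 1 + PySem.Int.floordiv (max p.1 h_ - 1) p.1 * p.2)) := by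
  rw [zip_eq_map_range a c hlen, List.map_map]
  simp only [PySem.List.len_eq, PySem.List.pyRange_zero_natCast, List.map_map]
  apply List.map_congr_left
  intro k hk
  simp only [Function.comp_apply, PySem.List.pyGetD_natCast]
  have hnum : max 0 (h_ - a.getD k 0) + a.getD k 0 - 1 = max (a.getD k 0) h_ - 1 := by omega
  rw [hnum]

lemma loop_eq (h_ : Int) (a c : List Int) (base : Int) (groups : PySem.Dict Int Int)
    (hcheck : ∀ m : Int, solveCheck h_ a c m = altReaches h_ base groups m) :
    ∀ (k : ℕ) (lo hi best : Int), (hi + 1 - lo).toNat ≤ k →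
    bsLoop h_ a c lo hi best = altSearch h_ base groups lo hi best := by
  intro k
  induction k with
  | zero =>
    intro lo hi best h0
    rw [bsLoop.eq_def, altSearch.eq_def, dif_neg (by omega : ¬ lo ≤ hi),
      dif_neg (by omega : ¬ lo ≤ hi)]
  | succ k ih =>
    intro lo hi best h0
    rw [bsLoop.eq_def, altSearch.eq_def]
    by_cases hlu : lo ≤ hi
    · rw [dif_pos hlu, dif_pos hlu]
      have hmb := PySem.Int.floordiv_two_mid_bounds hlu
      set mid := PySem.Int.floordiv (lo + hi) 2 with hmid
      dsimp only
      rw [hcheck mid]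
      by_cases hchk : altReaches h_ base groups mid
      · rw [if_pos hchk, if_pos hchk]
        exact ih lo (mid - 1) mid (by omega)
      · rw [if_neg hchk, if_neg hchk]
        exact ih (mid + 1) hi best (by omega)
    · rw [dif_neg hlu, dif_neg hlu]

-- ===== VERDICT (by name: the statement is the Claim_ definition above) =====
theorem solve_spec : Claim_equal_solve := by
  intro h_ a c _ hpre
  obtain ⟨_, hlen, _, _⟩ := hpre
  unfold Spec_solve
  have h1 : solve h_ a c
      = bsLoop h_ a c 1
          ((PySem.List.min? ((PySem.List.pyRange 0 (PySem.List.len a) 1).map (fun i =>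
              1 + PySem.Int.floordiv
                    (max 0 (h_ - PySem.List.pyGetD a i 0) + PySem.List.pyGetD a i 0 - 1)
                    (PySem.List.pyGetD a i 0) * PySem.List.pyGetD c i 0)) (fun x => x)).getD 0)
          (-1) := rfl
  have h2 : solve_alt h_ a c
      = altSearch h_ ((PySem.Dict.values (altGroups (a.zip c))).sum) (altGroups (a.zip c)) 1
          ((PySem.List.min? ((a.zip c).map (fun p =>
              1 + PySem.Int.floordiv (max p.1 h_ - 1) p.1 * p.2)) (fun x => x)).getD 0)
          (-1) := rfl
  rw [h1, h2, upper_lists_eq h_ a c hlen]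
  exact loop_eq h_ a c _ _ (check_eq_reaches h_ a c hlen)
    (((PySem.List.min? ((a.zip c).map (fun p =>
        1 + PySem.Int.floordiv (max p.1 h_ - 1) p.1 * p.2)) (fun x => x)).getD 0) + 1 - 1).toNat
    1 _ (-1) (by omega)
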